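-- pv_equiv track=rewrite | github.com/sergiorgiraldo/AdventOfCode2016 | solutions/day02/solution.py | get_bathroom_code
-- ===== SOURCE A (Python) =====
-- def get_bathroom_code(instructions):
--     keypad = [
--         [1, 2, 3],
--         [4, 5, 6],
--         [7, 8, 9]]
--
--     keypad, code = [*zip(*keypad[::-1])], []
--
--     for instruction in instructions:
--         x, y = code[-1] if code else (1, 1)
--         for step in instruction:
--             tx = x + (step in 'LR' and (-1) ** (step == 'L'))
--             ty = y + (step in 'UD' and (-1) ** (step == 'D'))
--             try:
--                 if tx < 0 or ty < 0:
--                     raise IndexError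
--                 keypad[tx][ty]
--             except IndexError:
--                 continue
--             else:
--                 x, y = tx, ty
--
--         code.append((x, y))
--
--     code_keys = [keypad[x][y] for x, y in code]
--
--     code = "".join(str(key) for key in code_keys)
--
--     return code
-- ===== SOURCE B (Python) =====
-- def get_bathroom_code(instructions):
--     transitions = {
--         1: {'U': 1, 'D': 4, 'L': 1, 'R': 2},
--         2: {'U': 2, 'D': 5, 'L': 1, 'R': 3},
--         3: {'U': 3, 'D': 6, 'L': 2, 'R': 3},
--         4: {'U': 1, 'D': 7, 'L': 4, 'R': 5},
--         5: {'U': 2, 'D': 8, 'L': 4, 'R': 6},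
--         6: {'U': 3, 'D': 9, 'L': 5, 'R': 6},
--         7: {'U': 4, 'D': 7, 'L': 7, 'R': 8},
--         8: {'U': 5, 'D': 8, 'L': 7, 'R': 9},
--         9: {'U': 6, 'D': 9, 'L': 8, 'R': 9},
--     }
--     key = 5
--     keys = []
--     for instruction in instructions:
--         for step in instruction:
--             key = transitions[key].get(step, key)
--         keys.append(key)
--     return "".join(str(k) for k in keys)
-- ===== Notes on version B (the rewrite author's own statement) =====
-- stated objective: idiomatic
-- what changed: Replaces the coordinate (x,y) walk with try/except bounds handling and a transposed keypad matrix by a precomputed digit-to-digit transition table: the state is the current digit and each step is one dictionary lookup with the current digit as default.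
import Mathlib
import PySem

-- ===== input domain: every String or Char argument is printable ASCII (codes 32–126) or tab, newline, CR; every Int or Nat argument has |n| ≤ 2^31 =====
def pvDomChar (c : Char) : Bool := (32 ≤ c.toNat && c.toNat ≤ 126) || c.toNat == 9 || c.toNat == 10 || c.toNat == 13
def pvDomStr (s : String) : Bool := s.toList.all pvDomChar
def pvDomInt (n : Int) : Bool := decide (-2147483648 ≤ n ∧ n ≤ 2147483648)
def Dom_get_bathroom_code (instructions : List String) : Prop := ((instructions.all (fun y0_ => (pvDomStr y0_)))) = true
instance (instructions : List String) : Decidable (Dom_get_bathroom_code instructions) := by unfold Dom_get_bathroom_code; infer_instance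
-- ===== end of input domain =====

-- B replaces coordinate arithmetic with try/except bounds handling by a precomputed
-- digit-to-digit transition table looked up per step (objective: idiomatic).

-- ===== PORT A =====
-- keypad = [[1,2,3],[4,5,6],[7,8,9]]; [*zip(*keypad[::-1])] zips the three reversed rows
def pvKeypadA : List (List Int) :=
  match ([[1,2,3],[4,5,6],[7,8,9]] : List (List Int)).reverse with
  | r0 :: r1 :: r2 :: _ => ((r0.zip r1).zip r2).map (fun t => [t.1.1, t.1.2, t.2])
  | _ => []

-- one iteration of the inner loop; 'step in "LR"' on a single char is c = 'L' ∨ c = 'R'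
def pvStepA (p : Int × Int) (c : Char) : Int × Int :=
  let tx := p.1 + (if c = 'L' ∨ c = 'R' then (if c = 'L' then (-1 : Int) else 1) else 0)
  let ty := p.2 + (if c = 'U' ∨ c = 'D' then (if c = 'D' then (-1 : Int) else 1) else 0)
  if tx < 0 ∨ ty < 0 then p
  else
    match (PySem.List.pyGet? pvKeypadA tx).bind (fun row => PySem.List.pyGet? row ty) with
    | none => p          -- IndexError: continue (keep x, y)
    | some _ => (tx, ty)

def get_bathroom_code (instructions : List String) : String :=
  let code : List (Int × Int) := instructions.foldl
    (fun code s =>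
      -- x, y = code[-1] if code else (1, 1); then the inner loop over the chars
      code ++ [s.toList.foldl pvStepA ((PySem.List.pyGet? code (-1)).getD (1, 1))])
    []
  -- keypad[x][y] for the collected positions; indices are always in range so getD 0 is never used
  let code_keys := code.map (fun p =>
    ((PySem.List.pyGet? pvKeypadA p.1).bind (fun row => PySem.List.pyGet? row p.2)).getD 0)
  PySem.Str.join "" (code_keys.map PySem.Int.toStr)

-- ===== PORT B =====
def pvTrans : PySem.Dict Int (PySem.Dict Char Int) := PySem.Dict.mk
  [ (1, PySem.Dict.mk [('U', 1), ('D', 4), ('L', 1), ('R', 2)])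
  , (2, PySem.Dict.mk [('U', 2), ('D', 5), ('L', 1), ('R', 3)])
  , (3, PySem.Dict.mk [('U', 3), ('D', 6), ('L', 2), ('R', 3)])
  , (4, PySem.Dict.mk [('U', 1), ('D', 7), ('L', 4), ('R', 5)])
  , (5, PySem.Dict.mk [('U', 2), ('D', 8), ('L', 4), ('R', 6)])
  , (6, PySem.Dict.mk [('U', 3), ('D', 9), ('L', 5), ('R', 6)])
  , (7, PySem.Dict.mk [('U', 4), ('D', 7), ('L', 7), ('R', 8)])
  , (8, PySem.Dict.mk [('U', 5), ('D', 8), ('L', 7), ('R', 9)])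
  , (9, PySem.Dict.mk [('U', 6), ('D', 9), ('L', 8), ('R', 9)]) ]

-- transitions[key].get(step, key); key is always 1..9 so the outer getD default is never used
def pvStepB (k : Int) (c : Char) : Int :=
  PySem.Dict.getD (PySem.Dict.getD pvTrans k (PySem.Dict.mk [])) c k

def get_bathroom_code_alt (instructions : List String) : String :=
  let st : Int × List Int := instructions.foldl
    (fun st s =>
      (s.toList.foldl pvStepB st.1, st.2 ++ [s.toList.foldl pvStepB st.1]))
    (5, [])
  PySem.Str.join "" (st.2.map PySem.Int.toStr)

-- ===== PRECONDITION & SPEC =====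
def Spec_get_bathroom_code (instructions : List String) (out : String) : Prop := out = get_bathroom_code_alt instructions
instance (instructions : List String) (out : String) : Decidable (Spec_get_bathroom_code instructions out) := by unfold Spec_get_bathroom_code; infer_instance

-- ===== CLAIM (what is proved, stated in full; the proofs are below) =====
def Claim_equal_get_bathroom_code : Prop := ∀ (instructions : List String), Dom_get_bathroom_code instructions → Spec_get_bathroom_code instructions (get_bathroom_code instructions)

-- ===== LEMMAS AND PROOFS =====

-- positions A can be at (decidable so the 9-state case analyses go through by `decide`)
def pvValid (p : Int × Int) : Bool :=
  decide (0 ≤ p.1) && decide (p.1 ≤ 2) && decide (0 ≤ p.2) && decide (p.2 ≤ 2)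

-- the keypad digit at position (x, y): column x, row y counted from the bottom
def pvDigit (p : Int × Int) : Int := p.1 + 1 + 3 * (2 - p.2)

theorem pvValid_bounds (p : Int × Int) (hp : pvValid p = true) :
    0 ≤ p.1 ∧ p.1 ≤ 2 ∧ 0 ≤ p.2 ∧ p.2 ≤ 2 := by
  unfold pvValid at hp; simp at hp; omega

theorem pvStep_rel (p : Int × Int) (hp : pvValid p = true) (c : Char) :
    pvStepB (pvDigit p) c = pvDigit (pvStepA p c) ∧ pvValid (pvStepA p c) = true := by
  obtain ⟨x, y⟩ := p
  obtain ⟨h1, h2, h3, h4⟩ := pvValid_bounds _ hp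
  simp only at h1 h2 h3 h4
  have hx : x = 0 ∨ x = 1 ∨ x = 2 := by omega
  have hy : y = 0 ∨ y = 1 ∨ y = 2 := by omega
  by_cases hL : c = 'L'
  · subst hL; rcases hx with rfl | rfl | rfl <;> rcases hy with rfl | rfl | rfl <;> decide
  by_cases hR : c = 'R'
  · subst hR; rcases hx with rfl | rfl | rfl <;> rcases hy with rfl | rfl | rfl <;> decide
  by_cases hU : c = 'U'
  · subst hU; rcases hx with rfl | rfl | rfl <;> rcases hy with rfl | rfl | rfl <;> decide
  by_cases hD : c = 'D'
  · subst hD; rcases hx with rfl | rfl | rfl <;> rcases hy with rfl | rfl | rfl <;> decide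
  -- stray character: A stays put (tx = x, ty = y, the lookup succeeds), B's .get misses
  · have hA : pvStepA (x, y) c = (x, y) := by
      rcases hx with rfl | rfl | rfl <;> rcases hy with rfl | rfl | rfl <;>
        simp [pvStepA, pvKeypadA, hL, hR, hU, hD, PySem.List.pyGet?, PySem.List.pyIdx?]
    have hB : pvStepB (pvDigit (x, y)) c = pvDigit (x, y) := by
      have eL : ('L' == c) = false := beq_eq_false_iff_ne.mpr (Ne.symm hL)
      have eR : ('R' == c) = false := beq_eq_false_iff_ne.mpr (Ne.symm hR)
      have eU : ('U' == c) = false := beq_eq_false_iff_ne.mpr (Ne.symm hU)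
      have eD : ('D' == c) = false := beq_eq_false_iff_ne.mpr (Ne.symm hD)
      rcases hx with rfl | rfl | rfl <;> rcases hy with rfl | rfl | rfl <;>
        simp [pvStepB, pvTrans, pvDigit, PySem.Dict.getD, PySem.Dict.get?, List.find?,
              eL, eR, eU, eD]
    exact ⟨by rw [hA, hB], by rw [hA]; exact hp⟩

theorem pvFold_rel (l : List Char) (p : Int × Int) (hp : pvValid p = true) :
    l.foldl pvStepB (pvDigit p) = pvDigit (l.foldl pvStepA p) ∧ pvValid (l.foldl pvStepA p) = true := by
  induction l generalizing p with
  | nil => exact ⟨rfl, hp⟩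
  | cons c l ih =>
    obtain ⟨h1, h2⟩ := pvStep_rel p hp c
    simpa [List.foldl_cons, h1] using ih (pvStepA p c) h2

theorem pvStart_valid (code : List (Int × Int)) (h : ∀ p ∈ code, pvValid p = true) :
    pvValid ((PySem.List.pyGet? code (-1)).getD (1, 1)) = true := by
  rw [PySem.List.pyGet?_neg_one]
  cases hg : code.getLast? with
  | none => decide
  | some p => exact h p (List.mem_of_getLast? hg)

-- invariant of the outer loops: B's key is the digit of A's next starting position,
-- and B's collected keys are the digits of A's collected positions
theorem pvOuter (ins : List String) (code : List (Int × Int)) (h : ∀ p ∈ code, pvValid p = true) :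
    ins.foldl (fun st s => (s.toList.foldl pvStepB st.1, st.2 ++ [s.toList.foldl pvStepB st.1]))
        (pvDigit ((PySem.List.pyGet? code (-1)).getD (1, 1)), code.map pvDigit)
      = (pvDigit ((PySem.List.pyGet?
            (ins.foldl (fun code s => code ++ [s.toList.foldl pvStepA ((PySem.List.pyGet? code (-1)).getD (1, 1))]) code)
            (-1)).getD (1, 1)),
         (ins.foldl (fun code s => code ++ [s.toList.foldl pvStepA ((PySem.List.pyGet? code (-1)).getD (1, 1))]) code).map pvDigit)
    ∧ ∀ p ∈ ins.foldl (fun code s => code ++ [s.toList.foldl pvStepA ((PySem.List.pyGet? code (-1)).getD (1, 1))]) code, pvValid p = true := by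
  induction ins generalizing code with
  | nil => exact ⟨rfl, h⟩
  | cons s ins ih =>
    obtain ⟨hf, hv⟩ := pvFold_rel s.toList _ (pvStart_valid code h)
    set p' := s.toList.foldl pvStepA ((PySem.List.pyGet? code (-1)).getD (1, 1)) with hp'
    have hvalid : ∀ p ∈ code ++ [p'], pvValid p = true := by
      intro p hp
      rcases List.mem_append.mp hp with hp | hp
      · exact h p hp
      · simpa using (List.mem_singleton.mp hp) ▸ hv
    have hstart : (PySem.List.pyGet? (code ++ [p']) (-1)).getD (1, 1) = p' := by
      rw [PySem.List.pyGet?_neg_one_append_singleton]; rfl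
    obtain ⟨ih1, ih2⟩ := ih (code ++ [p']) hvalid
    refine ⟨?_, ih2⟩
    simp only [List.foldl_cons, hf, hstart, List.map_append, List.map_cons, List.map_nil] at ih1 ⊢
    exact ih1

theorem pvLookup_digit (p : Int × Int) (hp : pvValid p = true) :
    ((PySem.List.pyGet? pvKeypadA p.1).bind (fun row => PySem.List.pyGet? row p.2)).getD 0
      = pvDigit p := by
  obtain ⟨x, y⟩ := p
  obtain ⟨h1, h2, h3, h4⟩ := pvValid_bounds _ hp
  simp only at h1 h2 h3 h4
  have hx : x = 0 ∨ x = 1 ∨ x = 2 := by omega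
  have hy : y = 0 ∨ y = 1 ∨ y = 2 := by omega
  rcases hx with rfl | rfl | rfl <;> rcases hy with rfl | rfl | rfl <;> decide

-- ===== VERDICT (by name: the statement is the Claim_ definition above) =====
theorem get_bathroom_code_spec : Claim_equal_get_bathroom_code := by
  intro ins _
  unfold Spec_get_bathroom_code get_bathroom_code get_bathroom_code_alt
  obtain ⟨h1, h2⟩ := pvOuter ins [] (by simp)
  have e : (pvDigit ((PySem.List.pyGet? ([] : List (Int × Int)) (-1)).getD (1, 1)),
      ([] : List (Int × Int)).map pvDigit) = ((5 : Int), ([] : List Int)) := by decide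
  rw [e] at h1
  simp only [h1]
  refine congrArg _ (congrArg _ ?_)
  exact List.map_congr_left (fun p hp => pvLookup_digit p (h2 p hp))
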